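-- pv_equiv track=rewrite | github.com/LSe-Yeong/Backjoon | python/백준 문제집/P10431.py | insert_x
-- ===== SOURCE A (Python) =====
-- def insert_x(arr,x):
--     if len(arr)==0:
--         arr.append(x)
--         return 0
--
--     result = 0
--     for i in range(len(arr)):
--         if arr[i] > x:
--             result += (len(arr)-i)
--             arr.insert(i,x)
--             return result
--
--     arr.append(x)
--     return result
-- ===== SOURCE B (Python) =====
-- def insert_x(arr, x):
--     pos = len(arr)
--     for i, e in reversed(list(enumerate(arr))):
--         if e > x:
--             pos = i
--     result = len(arr) - pos
--     arr.insert(pos, x)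
--     return result
-- ===== Notes on version B (the rewrite author's own statement) =====
-- stated objective: alternative
-- what changed: Replaced A's forward index scan with an early return and an empty-list special case by a single backward scan over reversed(enumerate(arr)) that keeps the smallest index of an element > x, followed by one uniform insert and a subtraction; no special cases or early exit.
import Mathlib
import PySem

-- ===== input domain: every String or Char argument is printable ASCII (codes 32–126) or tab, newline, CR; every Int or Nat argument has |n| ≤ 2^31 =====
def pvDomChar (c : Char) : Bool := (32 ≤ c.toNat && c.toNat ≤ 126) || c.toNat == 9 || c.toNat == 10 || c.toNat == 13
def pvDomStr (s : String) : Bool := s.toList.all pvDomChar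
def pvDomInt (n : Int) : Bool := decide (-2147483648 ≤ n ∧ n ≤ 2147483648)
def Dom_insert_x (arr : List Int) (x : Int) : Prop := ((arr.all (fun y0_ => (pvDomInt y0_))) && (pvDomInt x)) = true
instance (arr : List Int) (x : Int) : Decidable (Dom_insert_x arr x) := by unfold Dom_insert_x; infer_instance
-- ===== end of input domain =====

-- B replaces A's forward scan with early return by a backward scan that keeps the
-- smallest index of an element > x, then one uniform insert; alternative decomposition,
-- same O(n) cost. Both A and B insert x into arr in place at the same position;
-- the theorems below are about the RETURN value.


-- ===== PORT A =====
-- A's `for i in range(len(arr))` with early return `len(arr)-i` on the first arr[i] > x: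
-- structural recursion over the suffix starting at index i (result stays 0 until the return).
def insert_x_loopA (x : Int) (n : Int) : List Int → Int → Int
  | [], _ => 0
  | a :: rest, i => if a > x then n - i else insert_x_loopA x n rest (i + 1)

def insert_x (arr : List Int) (x : Int) : Int :=
  if arr.length = 0 then 0
  else insert_x_loopA x (arr.length : Int) arr 0

-- ===== PORT B =====
-- B: pos starts at len(arr); `for i, e in reversed(list(enumerate(arr))): if e > x: pos = i`;
-- result = len(arr) - pos (the in-place insert does not affect the return value).
def insert_x_alt (arr : List Int) (x : Int) : Int :=
  let pos : Int :=
    ((PySem.List.enumerate arr 0).reverse).foldl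
      (fun pos p => if p.2 > x then p.1 else pos) (arr.length : Int)
  (arr.length : Int) - pos

-- ===== PRECONDITION & SPEC =====
def Spec_insert_x (arr : List Int) (x : Int) (out : Int) : Prop := out = insert_x_alt arr x
instance (arr : List Int) (x : Int) (out : Int) : Decidable (Spec_insert_x arr x out) := by unfold Spec_insert_x; infer_instance

-- ===== CLAIM (what is proved, stated in full; the proofs are below) =====
def Claim_equal_insert_x : Prop := ∀ (arr : List Int) (x : Int), Dom_insert_x arr x → Spec_insert_x arr x (insert_x arr x)

-- ===== LEMMAS AND PROOFS =====

-- A's loop returns n - i - (index of the first element > x, or the suffix length).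
theorem insert_x_loopA_eq (x : Int) :
    ∀ (l : List Int) (n i : Int), n = i + l.length →
      insert_x_loopA x n l i = n - i - (l.findIdx (fun a => decide (x < a)) : Int) := by
  intro l
  induction l with
  | nil => intro n i h; simp [insert_x_loopA] at *; omega
  | cons a rest ih =>
      intro n i h
      simp only [insert_x_loopA, List.findIdx_cons]
      by_cases hx : x < a
      · simp [hx]
      · simp only [hx, decide_false, if_false, cond_false]
        rw [ih n (i + 1) (by simp at h ⊢; omega)]
        push_cast
        ring

-- B's backward fold computes the smallest index whose element is > x (else keeps init).
theorem insert_x_foldB_eq (x : Int) :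
    ∀ (l : List Int) (s init : Int),
      ((PySem.List.enumerate l s).reverse).foldl
          (fun pos p => if p.2 > x then p.1 else pos) init
        = if l.findIdx (fun a => decide (x < a)) < l.length
            then s + (l.findIdx (fun a => decide (x < a)) : Int) else init := by
  intro l
  induction l with
  | nil => intro s init; simp [PySem.List.enumerate_nil]
  | cons a rest ih =>
      intro s init
      rw [PySem.List.enumerate_cons]
      simp only [List.reverse_cons, List.foldl_append, List.foldl_cons, List.foldl_nil,
        List.findIdx_cons, List.length_cons]
      by_cases hx : x < a
      · simp [hx]
      · simp only [hx, decide_false, if_false, cond_false, gt_iff_lt]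
        have ih' := ih (s + 1) init
        simp only [gt_iff_lt] at ih'
        rw [ih']
        by_cases hlt : rest.findIdx (fun a => decide (x < a)) < rest.length
        · simp only [hlt, if_true]
          rw [if_pos (by omega)]
          push_cast; ring
        · simp only [hlt, if_false]
          rw [if_neg (by omega)]

-- ===== VERDICT (by name: the statement is the Claim_ definition above) =====
theorem insert_x_spec : Claim_equal_insert_x := by
  intro arr x _
  show insert_x arr x = insert_x_alt arr x
  have hfle := List.findIdx_le_length (p := fun a => decide (x < a)) (xs := arr)
  unfold insert_x insert_x_alt
  rw [insert_x_foldB_eq]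
  by_cases h0 : arr.length = 0
  · simp [h0]
  · rw [if_neg h0, insert_x_loopA_eq x arr arr.length 0 (by simp)]
    by_cases hlt : arr.findIdx (fun a => decide (x < a)) < arr.length
    · simp [hlt]
    · have : arr.findIdx (fun a => decide (x < a)) = arr.length := by omega
      simp [this]
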